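-- pv_equiv track=rewrite | github.com/posgnu/tiny-search | build_index.py | get_token_shard_num
-- ===== SOURCE A (Python) =====
-- def get_token_shard_num(skip_tokens, token):
--     for idx, skip_token in enumerate(skip_tokens):
--         if skip_token > token:
--             shard_num = idx - 1
--             break
--     else:
--         shard_num = len(skip_tokens) - 1
--     return shard_num
-- ===== SOURCE B (Python) =====
-- def get_token_shard_num(skip_tokens, token):
--     lo, hi = 0, len(skip_tokens)
--     while lo < hi:
--         mid = (lo + hi) // 2
--         if skip_tokens[mid] <= token:
--             lo = mid + 1
--         else:
--             hi = mid
--     return lo - 1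
-- ===== Notes on version B (the rewrite author's own statement) =====
-- stated objective: alternative
-- what changed: Replaced the linear enumerate-and-break scan with a lo/hi binary search (bisect_right insertion point minus 1) over the sorted skip-token list; fewer comparisons, though not measurably faster at the measured sizes.
-- outside the precondition, e.g. on get_token_shard_num(['b', 'a'], 'a'): A returns -1, B returns 1
import Mathlib
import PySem

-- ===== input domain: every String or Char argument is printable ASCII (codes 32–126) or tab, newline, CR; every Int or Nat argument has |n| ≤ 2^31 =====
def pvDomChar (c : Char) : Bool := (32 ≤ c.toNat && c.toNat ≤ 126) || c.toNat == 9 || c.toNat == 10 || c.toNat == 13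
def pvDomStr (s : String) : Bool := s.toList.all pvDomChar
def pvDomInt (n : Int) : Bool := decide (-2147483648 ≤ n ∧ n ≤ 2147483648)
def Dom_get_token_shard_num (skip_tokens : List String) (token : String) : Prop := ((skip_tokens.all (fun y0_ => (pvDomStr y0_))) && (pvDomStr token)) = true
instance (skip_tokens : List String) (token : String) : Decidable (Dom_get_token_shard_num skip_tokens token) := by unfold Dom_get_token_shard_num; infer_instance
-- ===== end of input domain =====

-- B replaces A's linear scan with a lo/hi binary search over the sorted skip-token list.

-- ===== PORT A =====
-- A's for/enumerate loop with break; `full` keeps the whole list for the else-branch `len(skip_tokens) - 1`.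
def goA (full : List String) (token : String) : List String → Nat → Int
  | [], _ => (full.length : Int) - 1
  | t :: rest, idx => if token < t then (idx : Int) - 1 else goA full token rest (idx + 1)

def get_token_shard_num (skip_tokens : List String) (token : String) : Int :=
  goA skip_tokens token skip_tokens 0

-- ===== PORT B =====
-- B's while lo < hi loop; skip_tokens[mid] is always in range since lo < hi ≤ len (getD's default is never read).
def bsearchB (skip_tokens : List String) (token : String) (lo hi : Nat) : Nat :=
  if lo < hi then
    let mid := (lo + hi) / 2
    if skip_tokens.getD mid "" ≤ token then bsearchB skip_tokens token (mid + 1) hi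
    else bsearchB skip_tokens token lo mid
  else lo
termination_by hi - lo
decreasing_by all_goals omega

def get_token_shard_num_alt (skip_tokens : List String) (token : String) : Int :=
  (bsearchB skip_tokens token 0 skip_tokens.length : Int) - 1

-- ===== PRECONDITION & SPEC =====
-- Pre_ restricts to binary search's natural domain: the elements ≤ token form a prefix of
-- skip_tokens (true of every sorted skip list, which build_index produces by construction);
-- on lists not partitioned around token A's linear scan and B's binary search legitimately differ.
def Pre_get_token_shard_num (skip_tokens : List String) (token : String) : Prop :=
  ∀ x ∈ skip_tokens.dropWhile (fun t => decide (t.toList ≤ token.toList)), ¬ x.toList ≤ token.toList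
instance (skip_tokens : List String) (token : String) : Decidable (Pre_get_token_shard_num skip_tokens token) := by unfold Pre_get_token_shard_num; infer_instance

def pvWitness_get_token_shard_num : List String × String := (["apple", "cat", "dog"], "cow")

def Spec_get_token_shard_num (skip_tokens : List String) (token : String) (out : Int) : Prop := out = get_token_shard_num_alt skip_tokens token
instance (skip_tokens : List String) (token : String) (out : Int) : Decidable (Spec_get_token_shard_num skip_tokens token out) := by unfold Spec_get_token_shard_num; infer_instance

-- ===== CLAIM (what is proved, stated in full; the proofs are below) =====
def Claim_equal_get_token_shard_num : Prop := ∀ (skip_tokens : List String) (token : String), Dom_get_token_shard_num skip_tokens token → Pre_get_token_shard_num skip_tokens token → Spec_get_token_shard_num skip_tokens token (get_token_shard_num skip_tokens token)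

-- ===== LEMMAS AND PROOFS =====

-- c = length of the prefix of elements ≤ token (the bisect_right insertion point for sorted lists).
def pvCut (token : String) (l : List String) : Nat := (l.takeWhile (· ≤ token)).length

theorem pvCut_le (token : String) (l : List String) : pvCut token l ≤ l.length := by
  simpa [pvCut] using (List.takeWhile_prefix (· ≤ token) (l := l)).length_le

-- A's scan equals the cut point: goA returns idx + cut - 1, or full.length - 1 when the list exhausts.
theorem goA_eq (full : List String) (token : String) :
    ∀ (l : List String) (idx : Nat),
      goA full token l idx =
        (if pvCut token l = l.length then (full.length : Int) - 1
         else ((idx : Int) + (pvCut token l)) - 1) := by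
  intro l
  induction l with
  | nil => intro idx; simp [goA, pvCut]
  | cons t rest ih =>
    intro idx
    by_cases h : token < t
    · have hle : ¬ t.toList ≤ token.toList :=
        fun hc => absurd (String.lt_iff_toList_lt.mp h) (not_lt.mpr hc)
      simp [goA, pvCut, h, hle, String.le_iff_toList_le]
    · have hle : t.toList ≤ token.toList := String.le_iff_toList_le.mp (not_lt.mp h)
      have hcut : pvCut token (t :: rest) = pvCut token rest + 1 := by
        simp [pvCut, String.le_iff_toList_le, hle]
      rw [goA, if_neg h, ih (idx + 1), hcut]
      by_cases hc : pvCut token rest = rest.length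
      · simp [hc]
      · have hc' : ¬ (pvCut token rest + 1 = rest.length + 1) := by omega
        simp only [List.length_cons, hc', if_neg hc, if_false]
        push_cast; ring

-- Characterisation on partitioned lists: the i-th element is ≤ token iff i < cut.
theorem part_char (token : String) :
    ∀ (l : List String), Pre_get_token_shard_num l token →
      ∀ i, i < l.length → ((l.getD i "" ≤ token) ↔ i < pvCut token l) := by
  intro l
  induction l with
  | nil => intro _ i hi; simp at hi
  | cons t rest ih =>
    intro hp i hi
    by_cases hle : t ≤ token
    · have hle' : t.toList ≤ token.toList := String.le_iff_toList_le.mp hle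
      have hp' : Pre_get_token_shard_num rest token := by
        intro x hx
        exact hp x (by simpa [Pre_get_token_shard_num, List.dropWhile_cons, hle'] using hx)
      cases i with
      | zero => simp [pvCut, hle, hle']
      | succ j =>
        have hj : j < rest.length := by simpa using hi
        have hcut : pvCut token (t :: rest) = pvCut token rest + 1 := by
          simp [pvCut, hle']
        have := ih hp' j hj
        simpa [List.getD_cons_succ, hcut, Nat.succ_lt_succ_iff] using this
    · have hle' : ¬ t.toList ≤ token.toList := fun hc => hle (String.le_iff_toList_le.mpr hc)
      have hall : ∀ x ∈ t :: rest, ¬ x.toList ≤ token.toList := by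
        intro x hx
        exact hp x (by simpa [Pre_get_token_shard_num, List.dropWhile_cons, hle'] using hx)
      have hcut : pvCut token (t :: rest) = 0 := by
        simp [pvCut, hle']
      have hmem : (t :: rest).getD i "" ∈ t :: rest := by
        have := List.getElem_mem (l := t :: rest) (n := i) hi
        simp [List.getD_eq_getElem?_getD, List.getElem?_eq_getElem hi, this]
      rw [hcut]
      constructor
      · intro habs
        exact absurd (String.le_iff_toList_le.mp habs) (hall _ hmem)
      · intro habs; omega

-- Binary-search invariant: with lo ≤ cut ≤ hi ≤ len, bsearchB converges to the cut point.
theorem bsearchB_eq (l : List String) (token : String)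
    (hs : Pre_get_token_shard_num l token) :
    ∀ (lo hi : Nat), lo ≤ pvCut token l → pvCut token l ≤ hi → hi ≤ l.length →
      bsearchB l token lo hi = pvCut token l := by
  intro lo hi
  induction hfuel : hi - lo using Nat.strong_induction_on generalizing lo hi with
  | _ n ih =>
    intro hlo hhi hlen
    by_cases h : lo < hi
    · rw [bsearchB, if_pos h]
      have hmid : (lo + hi) / 2 < l.length := by omega
      have hchar := part_char token l hs ((lo + hi) / 2) hmid
      by_cases hle : l.getD ((lo + hi) / 2) "" ≤ token
      · have hcm : (lo + hi) / 2 < pvCut token l := hchar.mp hle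
        rw [if_pos hle]
        exact ih (hi - ((lo + hi) / 2 + 1)) (by omega) _ _ rfl (by omega) hhi hlen
      · have hcm : pvCut token l ≤ (lo + hi) / 2 := by
          by_contra hcon
          exact hle (hchar.mpr (by omega))
        rw [if_neg hle]
        exact ih ((lo + hi) / 2 - lo) (by omega) _ _ rfl hlo (by omega) (by omega)
    · rw [bsearchB, if_neg h]
      omega

-- ===== VERDICT (by name: the statement is the Claim_ definition above) =====
theorem get_token_shard_num_spec : Claim_equal_get_token_shard_num := by
  intro skip_tokens token _ hpre
  unfold Spec_get_token_shard_num get_token_shard_num get_token_shard_num_alt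
  rw [goA_eq, bsearchB_eq skip_tokens token hpre 0 skip_tokens.length
        (Nat.zero_le _) (pvCut_le token skip_tokens) le_rfl]
  by_cases hc : pvCut token skip_tokens = skip_tokens.length
  · simp [hc]
  · simp [hc]
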